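-- pv_equiv track=rewrite | github.com/yejin7211/Algorithm | 프로그래머스/unrated/148653. 마법의 엘리베이터/마법의 엘리베이터.py | solution
-- ===== SOURCE A (Python) =====
-- def solution(storey):
--     answer = 0
--     s = str(storey)
--     i = 0
--     while i < len(s):
--         if int(s[i]) < 5:
--             answer += int(s[i])
--             i += 1
--             continue
--         cnt = 0
--         while i < len(s) and int(s[i]) >= 5:
--             cnt += 1
--             i += 1
--         if cnt == 1 and s[i-1] == '5':
--             answer += 5
--         else:
--             answer += 1
--             for j in range(i-cnt, i):
--                 if j == i-1:
--                     answer += 10 - int(s[j])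
--                 else:
--                     answer += 9 - int(s[j])
--     return answer
-- ===== SOURCE B (Python) =====
-- def solution(storey):
--     def cost(digits):
--         if not digits:
--             return 0
--         d = digits[0]
--         if d < 5:
--             return d + cost(digits[1:])
--         run = 1
--         while run < len(digits) and digits[run] >= 5:
--             run += 1
--         if digits[:run] == [5]:
--             return 5 + cost(digits[run:])
--         return 2 + sum(9 - x for x in digits[:run]) + cost(digits[run:])
--     return cost([int(ch) for ch in str(storey)])
-- ===== Notes on version B (the rewrite author's own statement) =====
-- stated objective: simpler
-- what changed: Replaces A's imperative index walk over str(storey) (outer while with index bookkeeping, an inner while counting a run and an inner for adding positional per-digit costs) by a short recursion on the digit list that prices each maximal run of high digits with a closed-form sum, one base case per run.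
import Mathlib
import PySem

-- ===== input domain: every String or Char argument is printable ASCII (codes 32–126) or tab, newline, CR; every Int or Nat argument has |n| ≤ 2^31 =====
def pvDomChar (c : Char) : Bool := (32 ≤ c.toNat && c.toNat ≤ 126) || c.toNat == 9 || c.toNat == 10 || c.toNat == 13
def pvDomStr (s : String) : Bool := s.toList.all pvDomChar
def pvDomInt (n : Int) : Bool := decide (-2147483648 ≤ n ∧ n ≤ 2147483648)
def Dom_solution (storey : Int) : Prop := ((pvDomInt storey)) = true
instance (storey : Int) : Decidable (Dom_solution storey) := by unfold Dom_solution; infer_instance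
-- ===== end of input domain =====

-- B replaces A's imperative index walk (inner while + positional inner for) by a short
-- recursion on the digit list with a closed-form cost per run of digits ≥ 5 (simpler).

-- ===== PORT A =====
-- int(s[i]) for a single char; 0 where Python raises ValueError (only reachable for
-- storey < 0, excluded by Pre_solution)
def aDig (c : Char) : Int := (PySem.Int.ofChars? [c]).getD 0

-- inner 'while i < len(s) and int(s[i]) >= 5: cnt += 1; i += 1' (returns cnt);
-- fuel makes the recursion structural, fuel = len(s) - i always suffices
def solRun : Nat → List Char → Nat → Nat
  | 0, _, _ => 0
  | fuel + 1, s, i =>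
    if h : i < s.length then
      if 5 ≤ aDig s[i] then solRun fuel s (i + 1) + 1 else 0
    else 0

-- outer 'while i < len(s)' loop of A (fuel = len(s) - i suffices)
def solGo : Nat → List Char → Nat → Int → Int
  | 0, _, _, answer => answer
  | fuel + 1, s, i, answer =>
    if h : i < s.length then
      if aDig s[i] < 5 then
        solGo fuel s (i + 1) (answer + aDig s[i])
      else
        let cnt := solRun (s.length - i) s i
        let i' := i + cnt
        if cnt = 1 ∧ PySem.List.pyGetD s ((i' : Int) - 1) ' ' = '5' then
          solGo fuel s i' (answer + 5)
        else
          solGo fuel s i'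
            ((PySem.List.pyRange ((i' : Int) - (cnt : Int)) (i' : Int) 1).foldl
              (fun acc j =>
                acc + (if j = (i' : Int) - 1 then 10 - aDig (PySem.List.pyGetD s j ' ')
                       else 9 - aDig (PySem.List.pyGetD s j ' '))) (answer + 1))
    else answer

-- s = str(storey); iterate over its characters (PySem.Int.toList_toStr)
def solution (storey : Int) : Int :=
  let s := PySem.Int.toChars storey
  solGo s.length s 0 0

-- ===== PORT B =====
-- 'while run < len(digits) and digits[run] >= 5: run += 1' (returns final run;
-- fuel = len(digits) suffices)
def bGoRun : Nat → List Int → Nat → Nat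
  | 0, _, run => run
  | fuel + 1, ds, run =>
    if h : run < ds.length then
      if 5 ≤ ds[run] then bGoRun fuel ds (run + 1) else run
    else run

-- the recursive 'cost(digits)' of B (fuel = len(digits) suffices: every call drops
-- at least one element); digits[:run] / digits[run:] have non-negative bounds, so
-- take/drop are exact for the Python slices
def bCost : Nat → List Int → Int
  | 0, _ => 0
  | fuel + 1, ds =>
    match ds with
    | [] => 0
    | d :: rest =>
      if d < 5 then d + bCost fuel rest
      else
        let run := bGoRun (d :: rest).length (d :: rest) 1
        if (d :: rest).take run = [5] then 5 + bCost fuel ((d :: rest).drop run)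
        else 2 + (((d :: rest).take run).map (fun x => 9 - x)).sum
               + bCost fuel ((d :: rest).drop run)

-- cost([int(ch) for ch in str(storey)])
def solution_alt (storey : Int) : Int :=
  let digits := (PySem.Int.toChars storey).map (fun ch => (PySem.Int.ofChars? [ch]).getD 0)
  bCost digits.length digits

-- ===== PRECONDITION & SPEC =====
-- A raises ValueError for storey < 0 (int('-') while scanning str(storey)); excluded.
def Pre_solution (storey : Int) : Prop := 0 ≤ storey
instance (storey : Int) : Decidable (Pre_solution storey) := by unfold Pre_solution; infer_instance
def pvWitness_solution : Int := 1234

def Spec_solution (storey : Int) (out : Int) : Prop := out = solution_alt storey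
instance (storey : Int) (out : Int) : Decidable (Spec_solution storey out) := by
  unfold Spec_solution; infer_instance

-- ===== CLAIM (what is proved, stated in full; the proofs are below) =====
def Claim_equal_solution : Prop :=
  ∀ (storey : Int), Dom_solution storey → Pre_solution storey →
    Spec_solution storey (solution storey)

-- ===== LEMMAS AND PROOFS =====

lemma aDig_digitChar (d : Nat) (h : d < 10) : aDig (Nat.digitChar d) = (d : Int) := by
  interval_cases d <;> decide

lemma digitChar_eq_five (d : Nat) (h : d < 10) : Nat.digitChar d = '5' ↔ d = 5 := by
  interval_cases d <;> decide

lemma drop_takeWhile_len {α : Type} (p : α → Bool) (l : List α) :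
    l.drop (l.takeWhile p).length = l.dropWhile p := by
  induction l with
  | nil => simp
  | cons x t ih =>
    by_cases h : p x <;> simp [h, ih]

lemma take_takeWhile_len {α : Type} (p : α → Bool) (l : List α) :
    l.take (l.takeWhile p).length = l.takeWhile p := by
  induction l with
  | nil => simp
  | cons x t ih =>
    by_cases h : p x <;> simp [h, ih]

lemma solRun_eq (fuel : Nat) : ∀ (ms : List Nat), (∀ d ∈ ms, d < 10) → ∀ i,
    ms.length - i ≤ fuel →
    solRun fuel (ms.map Nat.digitChar) i = ((ms.drop i).takeWhile (fun x => 5 ≤ x)).length := by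
  induction fuel with
  | zero =>
    intro ms h10 i hf
    rw [List.drop_eq_nil_of_le (by omega)]
    simp [solRun]
  | succ fuel ih =>
    intro ms h10 i hf
    by_cases h : i < ms.length
    · have hms : (ms.map Nat.digitChar).length = ms.length := by simp
      have hgt : (ms.map Nat.digitChar)[i]'(by omega) = Nat.digitChar (ms[i]'h) := by
        simp
      have h10i : ms[i]'h < 10 := h10 _ (List.getElem_mem h)
      rw [List.drop_eq_getElem_cons h]
      simp only [solRun, dif_pos (show i < (ms.map Nat.digitChar).length by omega), hgt,
        aDig_digitChar _ h10i, List.takeWhile_cons]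
      by_cases h5 : 5 ≤ ms[i]'h
      · rw [if_pos (by exact_mod_cast h5), if_pos (by simpa using h5)]
        rw [ih ms h10 (i + 1) (by omega)]
        simp
      · rw [if_neg (by exact_mod_cast h5), if_neg (by simpa using h5)]
        simp
    · rw [List.drop_eq_nil_of_le (by omega)]
      simp only [solRun]
      rw [dif_neg (by simpa using h)]
      simp

lemma fold_run : ∀ (r : List Nat) (i : Nat) (L : Int) (A : Int) (s : List Char),
    r ≠ [] → L = (i : Int) + r.length - 1 →
    (∀ k, (hk : k < r.length) → aDig (PySem.List.pyGetD s ((i + k : Nat) : Int) ' ') = ((r[k]'hk : Nat) : Int)) →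
    (PySem.List.pyRange (i : Int) ((i : Int) + r.length) 1).foldl
      (fun acc j => acc + (if j = L then 10 - aDig (PySem.List.pyGetD s j ' ')
                           else 9 - aDig (PySem.List.pyGetD s j ' '))) A
    = A + (((r.map (fun (x : Nat) => 9 - (x : Int))).sum) + 1) := by
  intro r
  induction r with
  | nil => intro i L A s hne; exact absurd rfl hne
  | cons x r' ih =>
    intro i L A s hne hL hv
    rw [PySem.List.pyRange_one_cons (by simp only [List.length_cons]; push_cast; omega)]
    simp only [List.foldl_cons]
    have hv0 : aDig (PySem.List.pyGetD s (i : Int) ' ') = (x : Int) := by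
      have := hv 0 (by simp)
      simpa using this
    rcases List.eq_nil_or_concat r' with h' | _
    · subst h'
      have hLi : L = (i : Int) := by simp at hL; omega
      rw [if_pos hLi.symm, hv0]
      rw [show (i : Int) + ((x :: ([] : List Nat)).length : Int) = i + 1 by simp]
      rw [show PySem.List.pyRange ((i : Int) + 1) ((i : Int) + 1) 1 = [] by
            simp [PySem.List.pyRange]]
      simp only [List.foldl_nil]
      simp
      ring
    · have hr' : r' ≠ [] := by rename_i h''; rcases h'' with ⟨l, b, rfl⟩; simp
      have hlen : 1 ≤ r'.length := by
        cases r' with | nil => simp at hr' | cons _ _ => simp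
      have hiL : (i : Int) ≠ L := by
        simp only [List.length_cons] at hL; push_cast at hL; omega
      rw [if_neg hiL, hv0]
      have harg : (i : Int) + ((x :: r').length : Int) = ((i + 1 : Nat) : Int) + (r'.length : Int) := by
        simp; push_cast; ring
      rw [harg, show (i : Int) + 1 = ((i + 1 : Nat) : Int) by push_cast; ring]
      rw [ih (i + 1) L _ s hr' (by simp only [List.length_cons] at hL; push_cast at hL ⊢; omega)
            (fun k hk => by
              have := hv (k + 1) (by simp; omega)
              rw [show ((i + 1) + k : Nat) = i + (k + 1) by omega]
              simpa using this)]
      simp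
      ring

def pvArun : List Nat → Int
  | [] => 0
  | d :: ms =>
    if d < 5 then (d : Int) + pvArun ms
    else
      let r := (d :: ms).takeWhile (fun x => 5 ≤ x)
      let rest := (d :: ms).dropWhile (fun x => 5 ≤ x)
      (if r = [5] then 5 else 1 + (((r.map (fun (x : Nat) => 9 - (x : Int))).sum) + 1)) + pvArun rest
  termination_by ms => ms.length + 1
  decreasing_by
    · simp
    · rename_i hd
      rw [List.dropWhile_cons_of_pos (by simpa using (by omega : 5 ≤ d))]
      have := List.length_dropWhile_le (fun x => decide (5 ≤ x)) ms
      simp only [List.length_cons]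
      omega

lemma solGo_eq (fuel : Nat) : ∀ (ms : List Nat), (∀ d ∈ ms, d < 10) →
    ∀ i a, ms.length - i ≤ fuel →
      solGo fuel (ms.map Nat.digitChar) i a = a + pvArun (ms.drop i) := by
  induction fuel with
  | zero =>
    intro ms h10 i a hf
    rw [List.drop_eq_nil_of_le (by omega)]
    simp [solGo, pvArun]
  | succ fuel ih =>
    intro ms h10 i a hf
    set s := ms.map Nat.digitChar with hs
    have hsl : s.length = ms.length := by simp [hs]
    by_cases h : i < ms.length
    · have hgt : s[i]'(by omega) = Nat.digitChar (ms[i]'h) := by simp [hs]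
      have h10i : ms[i]'h < 10 := h10 _ (List.getElem_mem h)
      have hdrop : ms.drop i = ms[i]'h :: ms.drop (i + 1) := List.drop_eq_getElem_cons h
      simp only [solGo, dif_pos (show i < s.length by omega), hgt, aDig_digitChar _ h10i]
      by_cases h5 : (ms[i]'h) < 5
      · rw [if_pos (by exact_mod_cast h5)]
        rw [ih ms h10 (i + 1) _ (by omega), hdrop]
        rw [pvArun, if_pos h5]
        ring
      · rw [if_neg (by exact_mod_cast h5)]
        have hrun : solRun (s.length - i) s i
            = ((ms.drop i).takeWhile (fun x => 5 ≤ x)).length := by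
          rw [hsl]; exact solRun_eq _ ms h10 i (by omega)
        set r := (ms.drop i).takeWhile (fun x => 5 ≤ x) with hr
        set rest := (ms.drop i).dropWhile (fun x => 5 ≤ x) with hrest
        have hrcons : r = ms[i]'h :: (ms.drop (i + 1)).takeWhile (fun x => 5 ≤ x) := by
          rw [hr, hdrop, List.takeWhile_cons_of_pos (by simpa using (by omega : 5 ≤ ms[i]'h))]
        have hrne : r ≠ [] := by rw [hrcons]; simp
        have hrlen1 : 1 ≤ r.length := by
          cases hr' : r with
          | nil => exact absurd hr' hrne
          | cons _ _ => simp
        have hrlen : r.length ≤ ms.length - i := by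
          have := (List.takeWhile_prefix (l := ms.drop i) (fun x => decide (5 ≤ x))).length_le
          simp only [List.length_drop] at this
          omega
        have hpref : r <+: ms.drop i := List.takeWhile_prefix _
        have hrget : ∀ k, (hk : k < r.length) → r[k]'hk = ms[i + k]'(by omega) := by
          intro k hk
          rw [hpref.getElem hk]
          rw [List.getElem_drop]
        have hlast : ms[i + r.length - 1]'(by omega) = r[r.length - 1]'(by omega) := by
          rw [hrget (r.length - 1) (by omega)]
          congr 1; omega
        have hgd : PySem.List.pyGetD s (((i + r.length : Nat) : Int) - 1) ' '
            = Nat.digitChar (ms[i + r.length - 1]'(by omega)) := by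
          rw [show ((i + r.length : Nat) : Int) - 1 = ((i + r.length - 1 : Nat) : Int) by push_cast; omega]
          rw [PySem.List.pyGetD_natCast]
          rw [List.getD_eq_getElem s ' ' (by omega)]
          simp [hs]
        have hcond : (solRun (s.length - i) s i = 1 ∧
              PySem.List.pyGetD s (((i + solRun (s.length - i) s i : Nat) : Int) - 1) ' ' = '5')
            ↔ r = [5] := by
          rw [hrun, hgd]
          constructor
          · rintro ⟨h1, h2⟩
            rcases List.length_eq_one_iff.mp h1 with ⟨y, hy⟩
            rw [digitChar_eq_five _ (h10 _ (List.getElem_mem _))] at h2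
            rw [hlast] at h2
            simp only [hy] at h2 ⊢
            simpa using h2
          · intro h5r
            have hl1 : r.length = 1 := by rw [h5r]; rfl
            refine ⟨hl1, ?_⟩
            rw [digitChar_eq_five _ (h10 _ (List.getElem_mem _))]
            rw [hlast]
            simp [h5r]
        by_cases hc5 : r = [5]
        · rw [if_pos (hcond.mpr hc5)]
          rw [hrun]
          rw [ih ms h10 (i + r.length) _ (by omega)]
          have hdr : ms.drop (i + r.length) = rest := by
            rw [hrest, ← drop_takeWhile_len (fun x => decide (5 ≤ x)) (ms.drop i),
                List.drop_drop, ← hr]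
          rw [hdr]
          conv_rhs => rw [hdrop]
          simp only [pvArun]
          rw [if_neg h5, ← hdrop, ← hr, ← hrest]
          rw [if_pos hc5]
          ring
        · rw [if_neg (fun hcc => hc5 (hcond.mp hcc))]
          rw [hrun]
          have hv' : ∀ k, (hk : k < r.length) →
              aDig (PySem.List.pyGetD s ((i + k : Nat) : Int) ' ') = ((r[k]'hk : Nat) : Int) := by
            intro k hk
            rw [PySem.List.pyGetD_natCast, List.getD_eq_getElem s ' ' (by omega)]
            have : s[i + k]'(by omega) = Nat.digitChar (ms[i + k]'(by omega)) := by simp [hs]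
            rw [this, aDig_digitChar _ (h10 _ (List.getElem_mem _)), hrget k hk]
          rw [show ((i + r.length : Nat) : Int) - ((r.length : Nat) : Int) = ((i : Nat) : Int) by
                push_cast; ring]
          rw [show ((i + r.length : Nat) : Int) = ((i : Nat) : Int) + ((r.length : Nat) : Int) by
                push_cast; ring]
          rw [fold_run r i ((i : Int) + (r.length : Int) - 1) (a + 1) s hrne rfl hv']
          rw [ih ms h10 (i + r.length) _ (by omega)]
          have hdr : ms.drop (i + r.length) = rest := by
            rw [hrest, ← drop_takeWhile_len (fun x => decide (5 ≤ x)) (ms.drop i),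
                List.drop_drop, ← hr]
          rw [hdr]
          conv_rhs => rw [hdrop]
          simp only [pvArun]
          rw [if_neg h5, ← hdrop, ← hr, ← hrest]
          rw [if_neg hc5]
          ring
    · rw [List.drop_eq_nil_of_le (by omega)]
      simp only [solGo, pvArun]
      rw [dif_neg (by omega)]
      ring

lemma toDigitsCore_eq (fuel : Nat) : ∀ m acc, 0 < m → m ≤ fuel →
    Nat.toDigitsCore 10 fuel m acc = ((Nat.digits 10 m).map Nat.digitChar).reverse ++ acc := by
  induction fuel with
  | zero => intro m acc h1 h2; omega
  | succ fuel ih =>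
    intro m acc h1 h2
    rw [Nat.digits_def' (by norm_num : 1 < 10) h1]
    show (if m / 10 = 0 then (m % 10).digitChar :: acc
          else Nat.toDigitsCore 10 fuel (m / 10) ((m % 10).digitChar :: acc)) = _
    by_cases h : m / 10 = 0
    · rw [if_pos h, h]
      simp
    · rw [if_neg h, ih (m / 10) _ (by omega) (by omega)]
      simp

lemma toDigits_eq (m : Nat) (hm : 0 < m) :
    Nat.toDigits 10 m = ((Nat.digits 10 m).map Nat.digitChar).reverse := by
  have := toDigitsCore_eq (m + 1) m [] hm (by omega)
  simpa [Nat.toDigits] using this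

-- B-side: the run-scanning while loop of B counts the takeWhile prefix
lemma bGoRun_eq (fuel : Nat) : ∀ (ds : List Int) (i : Nat), ds.length - i ≤ fuel →
    bGoRun fuel ds i = i + ((ds.drop i).takeWhile (fun x => decide (5 ≤ x))).length := by
  induction fuel with
  | zero =>
    intro ds i hf
    rw [List.drop_eq_nil_of_le (by omega)]
    simp [bGoRun]
  | succ fuel ih =>
    intro ds i hf
    by_cases h : i < ds.length
    · rw [List.drop_eq_getElem_cons h]
      simp only [bGoRun, dif_pos h, List.takeWhile_cons]
      by_cases h5 : (5 : Int) ≤ ds[i]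
      · rw [if_pos h5, ih ds (i + 1) (by omega)]
        simp [h5]
        omega
      · rw [if_neg h5]
        simp [h5]
    · rw [List.drop_eq_nil_of_le (by omega)]
      simp only [bGoRun]
      rw [dif_neg h]
      simp

-- casts commute with the run split
lemma takeWhile_castmap (l : List Nat) :
    ((l.map (fun d : Nat => (d : Int))).takeWhile (fun x => decide (5 ≤ x)))
      = (l.takeWhile (fun d => decide (5 ≤ d))).map (fun d : Nat => (d : Int)) := by
  induction l with
  | nil => simp
  | cons x t ih =>
    simp only [List.map_cons, List.takeWhile_cons]
    by_cases hx : 5 ≤ x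
    · simp only [decide_eq_true_eq]
      rw [if_pos (by exact_mod_cast hx), if_pos hx, ih]
      simp
    · simp only [decide_eq_true_eq]
      rw [if_neg (by exact_mod_cast hx), if_neg hx]
      simp

lemma dropWhile_castmap (l : List Nat) :
    ((l.map (fun d : Nat => (d : Int))).dropWhile (fun x => decide (5 ≤ x)))
      = (l.dropWhile (fun d => decide (5 ≤ d))).map (fun d : Nat => (d : Int)) := by
  induction l with
  | nil => simp
  | cons x t ih =>
    simp only [List.map_cons, List.dropWhile_cons]
    by_cases hx : 5 ≤ x
    · simp only [decide_eq_true_eq]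
      rw [if_pos (by exact_mod_cast hx), if_pos hx, ih]
    · simp only [decide_eq_true_eq]
      rw [if_neg (by exact_mod_cast hx), if_neg hx]
      simp

-- B's recursive cost equals the run-grouping value pvArun
lemma bCost_eq (fuel : Nat) : ∀ ms : List Nat, ms.length ≤ fuel → (∀ d ∈ ms, d < 10) →
    bCost fuel (ms.map (fun d : Nat => (d : Int))) = pvArun ms := by
  induction fuel with
  | zero =>
    intro ms h1 _
    obtain rfl : ms = [] := List.length_eq_zero_iff.mp (by omega)
    simp [bCost, pvArun]
  | succ fuel ih =>
    intro ms hlen h10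
    cases ms with
    | nil => simp [bCost, pvArun]
    | cons d t =>
      have ht10 : ∀ x ∈ t, x < 10 := fun x hx => h10 x (by simp [hx])
      simp only [List.map_cons, bCost]
      by_cases h5 : d < 5
      · rw [if_pos (by exact_mod_cast h5)]
        rw [ih t (by simp at hlen; omega) ht10]
        simp only [pvArun]
        rw [if_pos h5]
      · rw [if_neg (by exact_mod_cast h5)]
        set L : List Int := (d : Int) :: t.map (fun d : Nat => (d : Int)) with hL
        set tw := t.takeWhile (fun d => decide (5 ≤ d)) with htw
        have hklen : ((t.map (fun d : Nat => (d : Int))).takeWhile (fun x => decide (5 ≤ x))).length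
            = tw.length := by rw [takeWhile_castmap t, ← htw]; simp
        have hrun : bGoRun L.length L 1 = 1 + tw.length := by
          rw [bGoRun_eq L.length L 1 (by omega)]
          rw [show L.drop 1 = t.map (fun d : Nat => (d : Int)) from by simp [hL], hklen]
        have htake : L.take (1 + tw.length) = (d : Int) :: tw.map (fun d : Nat => (d : Int)) := by
          rw [hL, show (1 + tw.length) = tw.length + 1 from by omega, List.take_succ_cons]
          congr 1
          have h1 := take_takeWhile_len (fun x : Int => decide (5 ≤ x)) (t.map (fun d : Nat => (d : Int)))
          rw [hklen] at h1
          rw [h1, takeWhile_castmap t]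
        have hdropr : L.drop (1 + tw.length)
            = (t.dropWhile (fun d => decide (5 ≤ d))).map (fun d : Nat => (d : Int)) := by
          rw [hL, show (1 + tw.length) = tw.length + 1 from by omega, List.drop_succ_cons]
          have h1 := drop_takeWhile_len (fun x : Int => decide (5 ≤ x)) (t.map (fun d : Nat => (d : Int)))
          rw [hklen] at h1
          rw [h1, dropWhile_castmap t]
        have hrest10 : ∀ x ∈ t.dropWhile (fun d => decide (5 ≤ d)), x < 10 := fun x hx =>
          ht10 x ((List.dropWhile_sublist _).mem hx)
        have hih := ih (t.dropWhile (fun d => decide (5 ≤ d)))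
          (by
            have := List.length_dropWhile_le (fun d => decide (5 ≤ d)) t
            simp at hlen
            omega) hrest10
        simp only [pvArun]
        rw [if_neg h5]
        have hrw : (d :: t).takeWhile (fun x => decide (5 ≤ x)) = d :: tw := by
          rw [List.takeWhile_cons_of_pos (by simpa using (by omega : 5 ≤ d)), htw]
        have hrest' : (d :: t).dropWhile (fun x => decide (5 ≤ x))
            = t.dropWhile (fun d => decide (5 ≤ d)) := by
          rw [List.dropWhile_cons_of_pos (by simpa using (by omega : 5 ≤ d))]
        rw [hrun, htake, hdropr, hih, hrw, hrest']
        by_cases hc5 : d :: tw = [5]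
        · obtain ⟨hd, htwn⟩ := List.cons_eq_cons.mp hc5
          rw [if_pos (by rw [hd, htwn]; simp), if_pos hc5]
        · rw [if_neg (fun hcc => hc5 (by
              obtain ⟨h1, h2⟩ := List.cons_eq_cons.mp hcc
              rw [List.map_eq_nil_iff] at h2
              rw [show d = 5 from by exact_mod_cast h1, h2])), if_neg hc5]
          simp only [List.map_cons, List.map_map, List.sum_cons]
          have hsum : (tw.map ((fun x : Int => 9 - x) ∘ (fun d : Nat => (d : Int)))).sum
              = (tw.map (fun x : Nat => 9 - (x : Int))).sum := by congr 1
          rw [hsum]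
          push_cast
          ring

-- ===== VERDICT (by name: the statement is the Claim_ definition above) =====
theorem solution_spec : Claim_equal_solution := by
  intro storey hdom hpre
  unfold Spec_solution
  have hpre' : (0 : Int) ≤ storey := hpre
  have hm : storey = ((storey.toNat : Nat) : Int) := by omega
  set m := storey.toNat with hmm
  rcases Nat.eq_zero_or_pos m with h0 | hpos
  · rw [hm, h0]
    decide
  · have hchars : PySem.Int.toChars storey = ((Nat.digits 10 m).reverse).map Nat.digitChar := by
      rw [hm]
      simp only [PySem.Int.toChars]
      rw [if_neg (by omega)]
      rw [show ((m : Int)).toNat = m from by omega]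
      rw [toDigits_eq m hpos, List.map_reverse]
    have h10 : ∀ d ∈ (Nat.digits 10 m).reverse, d < 10 := by
      intro d hd
      exact Nat.digits_lt_base (by norm_num) (List.mem_reverse.mp hd)
    show solution storey = solution_alt storey
    unfold solution solution_alt
    rw [hchars]
    show solGo ((Nat.digits 10 m).reverse.map Nat.digitChar).length
          ((Nat.digits 10 m).reverse.map Nat.digitChar) 0 0
        = bCost ((((Nat.digits 10 m).reverse).map Nat.digitChar).map
            (fun ch => (PySem.Int.ofChars? [ch]).getD 0)).length
            ((((Nat.digits 10 m).reverse).map Nat.digitChar).map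
            (fun ch => (PySem.Int.ofChars? [ch]).getD 0))
    rw [show ((Nat.digits 10 m).reverse.map Nat.digitChar).length
          = (Nat.digits 10 m).reverse.length from by simp]
    rw [solGo_eq _ _ h10 0 0 (by omega)]
    rw [List.drop_zero]
    rw [List.map_map]
    rw [(List.map_congr_left (fun x hx => aDig_digitChar x (h10 x hx)) :
          ((Nat.digits 10 m).reverse.map
            ((fun ch => (PySem.Int.ofChars? [ch]).getD 0) ∘ Nat.digitChar))
          = ((Nat.digits 10 m).reverse.map (fun d : Nat => (d : Int))))]
    rw [show ((Nat.digits 10 m).reverse.map (fun d : Nat => (d : Int))).length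
          = (Nat.digits 10 m).reverse.length from by simp]
    rw [bCost_eq ((Nat.digits 10 m).reverse.length) _ le_rfl h10]
    ring
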